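-- pv_equiv track=rewrite | github.com/fabianofilho/healthcarecli | healthcarecli/fhir/cli.py | _top_keys
-- ===== SOURCE A (Python) =====
-- def _top_keys(resources: list[dict]) -> list[str]:
--     """Return the most useful top-level scalar keys for table display."""
--     priority = [
--         "resourceType",
--         "id",
--         "name",
--         "code",
--         "status",
--         "subject",
--         "effectiveDateTime",
--         "valueQuantity",
--         "birthDate",
--         "gender",
--     ]
--     all_keys: list[str] = []
--     for k in priority:
--         if any(k in r for r in resources):
--             all_keys.append(k)
--     return all_keys or list(resources[0].keys())[:6]
-- ===== SOURCE B (Python) =====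
-- PRIORITY = [
--     "resourceType",
--     "id",
--     "name",
--     "code",
--     "status",
--     "subject",
--     "effectiveDateTime",
--     "valueQuantity",
--     "birthDate",
--     "gender",
-- ]
--
--
-- def _top_keys(resources: list[dict]) -> list[str]:
--     """Return the most useful top-level scalar keys for table display."""
--     present = set()
--     for r in resources:
--         present.update(r)
--     result = [k for k in PRIORITY if k in present]
--     return result or list(resources[0].keys())[:6]
-- ===== Notes on version B (the rewrite author's own statement) =====
-- stated objective: simpler
-- what changed: Replaces the per-priority-key rescans of all resources (10 passes over the whole list) with one pass that collects every key into a set, followed by a priority-order membership filter; the first-six-keys fallback is unchanged.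
import Mathlib
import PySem

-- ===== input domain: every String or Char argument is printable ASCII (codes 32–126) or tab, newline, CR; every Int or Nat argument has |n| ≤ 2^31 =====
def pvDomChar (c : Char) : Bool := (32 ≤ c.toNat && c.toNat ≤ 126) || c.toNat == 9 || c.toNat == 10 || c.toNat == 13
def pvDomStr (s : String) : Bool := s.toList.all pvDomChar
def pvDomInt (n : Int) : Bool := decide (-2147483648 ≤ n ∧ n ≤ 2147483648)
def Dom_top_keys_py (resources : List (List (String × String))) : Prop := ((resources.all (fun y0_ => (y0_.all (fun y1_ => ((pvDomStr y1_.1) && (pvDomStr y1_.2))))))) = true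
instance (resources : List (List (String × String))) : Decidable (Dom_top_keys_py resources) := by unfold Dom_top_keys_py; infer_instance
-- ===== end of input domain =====

-- B replaces A's ten rescans of all resources (one per priority key) with one pass
-- collecting every key into a set, then a priority-order membership filter (objective: simpler).


-- ===== PORT A =====
def top_keys_py (resources : List (List (String × String))) : List String :=
  let priority : List String :=
    ["resourceType", "id", "name", "code", "status", "subject",
     "effectiveDateTime", "valueQuantity", "birthDate", "gender"]
  let all_keys : List String := priority.foldl
    (fun acc k => if resources.any (fun r => r.any (fun p => p.1 == k)) then acc ++ [k] else acc) []
  if all_keys.isEmpty then (PySem.List.dedup ((resources.headD []).map Prod.fst)).take 6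
  else all_keys

-- ===== PORT B =====
def pvPriorityB : List String :=
  ["resourceType", "id", "name", "code", "status", "subject",
   "effectiveDateTime", "valueQuantity", "birthDate", "gender"]

def top_keys_py_alt (resources : List (List (String × String))) : List String :=
  let present : PySem.Set String := resources.foldl
    (fun s r => PySem.Set.update s (PySem.List.dedup (r.map Prod.fst))) PySem.Set.empty
  let result : List String := pvPriorityB.filter (fun k => PySem.Set.contains present k)
  if result.isEmpty then (PySem.List.dedup ((resources.headD []).map Prod.fst)).take 6
  else result

-- ===== PRECONDITION & SPEC =====
-- Pre_ excludes only the empty list, on which A raises IndexError (resources[0] in the fallback).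
def Pre_top_keys_py (resources : List (List (String × String))) : Prop := resources ≠ []
instance (resources : List (List (String × String))) : Decidable (Pre_top_keys_py resources) := by unfold Pre_top_keys_py; infer_instance
def pvWitness_top_keys_py : (List (List (String × String))) := [[("id", "1"), ("x", "y")]]

def Spec_top_keys_py (resources : List (List (String × String))) (out : List String) : Prop := out = top_keys_py_alt resources
instance (resources : List (List (String × String))) (out : List String) : Decidable (Spec_top_keys_py resources out) := by unfold Spec_top_keys_py; infer_instance

-- ===== CLAIM (what is proved, stated in full; the proofs are below) =====
def Claim_equal_top_keys_py : Prop := ∀ (resources : List (List (String × String))), Dom_top_keys_py resources → Pre_top_keys_py resources → Spec_top_keys_py resources (top_keys_py resources)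

-- ===== LEMMAS AND PROOFS =====

-- the set built by B's pass contains exactly the keys any resource contains
lemma mem_present_foldl (resources : List (List (String × String))) (s : PySem.Set String) (k : String) :
    k ∈ resources.foldl (fun s r => PySem.Set.update s (PySem.List.dedup (r.map Prod.fst))) s
      ↔ k ∈ s ∨ ∃ r ∈ resources, ∃ p ∈ r, p.1 = k := by
  induction resources generalizing s with
  | nil => simp
  | cons r rest ih =>
    simp only [List.foldl_cons, ih, PySem.Set.mem_update, PySem.List.mem_dedup,
      List.mem_map, List.mem_cons]
    constructor
    · rintro (⟨h | ⟨p, hp, hk⟩⟩ | ⟨r', hr', h'⟩)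
      · exact Or.inl h
      · exact Or.inr ⟨r, Or.inl rfl, p, hp, hk⟩
      · exact Or.inr ⟨r', Or.inr hr', h'⟩
    · rintro (h | ⟨r', hr' | hr', p, hp, hk⟩)
      · exact Or.inl (Or.inl h)
      · exact Or.inl (Or.inr ⟨p, by rw [hr'] at hp; exact hp, hk⟩)
      · exact Or.inr ⟨r', hr', p, hp, hk⟩

lemma contains_present (resources : List (List (String × String))) (k : String) :
    PySem.Set.contains
      (resources.foldl (fun s r => PySem.Set.update s (PySem.List.dedup (r.map Prod.fst))) PySem.Set.empty) k
      = resources.any (fun r => r.any (fun p => p.1 == k)) := by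
  rw [Bool.eq_iff_iff, PySem.Set.contains_iff, mem_present_foldl, List.any_eq_true]
  simp [PySem.Set.empty, List.any_eq_true, beq_iff_eq]

-- ===== VERDICT (by name: the statement is the Claim_ definition above) =====
theorem top_keys_py_spec : Claim_equal_top_keys_py := by
  intro resources _ _
  unfold Spec_top_keys_py top_keys_py top_keys_py_alt pvPriorityB
  simp only []
  rw [PySem.List.foldl_append_if_eq_filter
        (p := fun k => resources.any (fun r => r.any (fun p => p.1 == k)))]
  simp only [List.nil_append]
  rw [List.filter_congr (fun k _ => (contains_present resources k).symm)]
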